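-- pv_equiv track=rewrite | github.com/MohammadAman5577/Astuto_Coding_Assessment | q1.py | first_stable_character
-- ===== SOURCE A (Python) =====
-- def first_stable_character(s):
--     """
--     Find the first stable character in the string.
--
--     A character is stable if:
--     1. It appears at least twice
--     2. All occurrences are in one continuous group
--
--     Args:
--         s (str): Input string
--
--     Returns:
--         str or None: First stable character, or None if no stable character exists
--
--     Examples:
--         >>> first_stable_character("abccba")
--         'c'
--         >>> first_stable_character("abc")
--         None
--         >>> first_stable_character("a")
--         None
--     """
--     stable_chars = set()
--     char_positions = {}
--     i = 0
--     while i < len(s):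
--         c = s[i]
--         if c in char_positions:
--             char_positions[c].append(i)
--         else:
--             char_positions[c] = [i]
--         i += 1
--     for c, positions in char_positions.items():
--         if len(positions) >= 2:
--             is_stable = True
--             j = 1
--             while j < len(positions):
--                 if positions[j] != positions[j - 1] + 1:
--                     is_stable = False
--                     break
--                 j += 1
--             if is_stable:
--                 stable_chars.add(c)
--     for c in s:
--         if c in stable_chars:
--             return c
--     return None
-- ===== SOURCE B (Python) =====
-- def first_stable_character(s):
--     # One pass splitting s into maximal runs: per char keep (#runs, last run length).
--     runs = {}
--     prev = None
--     length = 0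
--     for c in s:
--         if prev is not None and c == prev:
--             length += 1
--         else:
--             if prev is not None:
--                 cnt = runs[prev][0] if prev in runs else 0
--                 runs[prev] = (cnt + 1, length)
--             prev = c
--             length = 1
--     if prev is not None:
--         cnt = runs[prev][0] if prev in runs else 0
--         runs[prev] = (cnt + 1, length)
--     for c in s:
--         cnt, ln = runs[c]
--         if cnt == 1 and ln >= 2:
--             return c
--     return None
-- ===== Notes on version B (the rewrite author's own statement) =====
-- stated objective: faster
-- what changed: Replaces the per-character position-list dictionary and the pairwise consecutiveness scan by a single left-to-right run detector that records, per character, only its number of maximal runs and the length of its last run; a character is stable iff it has exactly one run of length >= 2.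
import Mathlib
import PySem

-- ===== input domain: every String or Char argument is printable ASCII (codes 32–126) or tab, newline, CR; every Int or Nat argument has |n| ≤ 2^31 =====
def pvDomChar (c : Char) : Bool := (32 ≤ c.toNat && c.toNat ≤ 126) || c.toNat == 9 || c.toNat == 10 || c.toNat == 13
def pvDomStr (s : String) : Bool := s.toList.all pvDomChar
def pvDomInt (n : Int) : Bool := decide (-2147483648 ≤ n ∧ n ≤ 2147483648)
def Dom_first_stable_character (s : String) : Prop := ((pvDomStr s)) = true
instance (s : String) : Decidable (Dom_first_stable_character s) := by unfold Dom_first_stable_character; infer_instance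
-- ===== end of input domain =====

-- B replaces A's per-character position lists + consecutiveness rescan by a one-pass run
-- detector keeping only (#runs, last run length) per char; measured faster by a constant factor.


-- ===== PORT A =====
-- first while loop: build char -> list of positions
def aPosLoop : List Char → Int → PySem.Dict Char (List Int) → PySem.Dict Char (List Int)
  | [], _, d => d
  | c :: t, i, d =>
    aPosLoop t (i + 1)
      (match d.get? c with
       | some ps => d.insert c (ps ++ [i])
       | none => d.insert c [i])

-- inner while loop: positions pairwise consecutive (with break)
def aChk : List Int → Bool
  | p :: q :: r => if q = p + 1 then aChk (q :: r) else false
  | _ => true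

-- for c, positions in char_positions.items(): collect stable chars
def aCollect : List (Char × List Int) → PySem.Set Char → PySem.Set Char
  | [], st => st
  | (c, ps) :: t, st =>
      aCollect t (if 2 ≤ ps.length ∧ aChk ps = true then st.add c else st)

-- final 'for c in s' loop
def aScan (st : PySem.Set Char) : List Char → Option String
  | [] => none
  | c :: t => if st.contains c then some (String.singleton c) else aScan st t

def first_stable_character (s : String) : Option String :=
  let d := aPosLoop s.toList 0 PySem.Dict.empty
  let st := aCollect d.items PySem.Set.empty
  aScan st s.toList

-- ===== PORT B =====
-- 'for c in s' loop of Source B: state = current open run (prev char, its length so far)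
def bFlush (st : Option (Char × Int)) (d : PySem.Dict Char (Int × Int)) : PySem.Dict Char (Int × Int) :=
  match st with
  | none => d
  | some (p, len) =>
      d.insert p ((match d.get? p with | some q => q.1 | none => 0) + 1, len)

def bGo : List Char → Option (Char × Int) → PySem.Dict Char (Int × Int) → PySem.Dict Char (Int × Int)
  | [], st, d => bFlush st d
  | c :: t, st, d =>
    match st with
    | some (p, len) =>
        if c = p then bGo t (some (p, len + 1)) d
        else bGo t (some (c, 1)) (bFlush (some (p, len)) d)
    | none => bGo t (some (c, 1)) d

-- final 'for c in s' loop; runs[c] ported as getD: every char of s has an entry, so exact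
def bScan (d : PySem.Dict Char (Int × Int)) : List Char → Option String
  | [] => none
  | c :: t =>
    let p := d.getD c (0, 0)
    if p.1 = 1 ∧ 2 ≤ p.2 then some (String.singleton c) else bScan d t

def first_stable_character_alt (s : String) : Option String :=
  bScan (bGo s.toList none PySem.Dict.empty) s.toList

-- ===== PRECONDITION & SPEC =====
def Spec_first_stable_character (s : String) (out : Option String) : Prop := out = first_stable_character_alt s
instance (s : String) (out : Option String) : Decidable (Spec_first_stable_character s out) := by unfold Spec_first_stable_character; infer_instance

-- ===== CLAIM (what is proved, stated in full; the proofs are below) =====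
def Claim_equal_first_stable_character : Prop := ∀ (s : String), Dom_first_stable_character s → Spec_first_stable_character s (first_stable_character s)

-- ===== LEMMAS AND PROOFS =====

-- positions of c in l, starting at index i
def pvPos (c : Char) : List Char → Int → List Int
  | [], _ => []
  | x :: t, i => if x = c then i :: pvPos c t (i + 1) else pvPos c t (i + 1)

-- lengths of the maximal runs of c in l, in order
def pvRuns (c : Char) : List Char → List Nat
  | [] => []
  | x :: t =>
    if x = c then ((t.takeWhile (· == x)).length + 1) :: pvRuns c (t.dropWhile (· == x))
    else pvRuns c t
termination_by l => l.length
decreasing_by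
  · exact Nat.lt_succ_of_le (List.length_dropWhile_le _ _)
  · exact Nat.lt_succ_of_le (Nat.le_refl _)

-- consecutive integers j, j+1, …, of length m
def pvSeq : Int → Nat → List Int
  | _, 0 => []
  | j, m + 1 => j :: pvSeq (j + 1) m


theorem pvPos_ge (c : Char) : ∀ (l : List Char) (i : Int), ∀ p ∈ pvPos c l i, i ≤ p := by
  intro l
  induction l with
  | nil => intro i p hp; simp [pvPos] at hp
  | cons x t ih =>
    intro i p hp
    by_cases hx : x = c
    · rw [pvPos, if_pos hx] at hp
      rcases List.mem_cons.mp hp with h | h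
      · omega
      · have := ih (i + 1) p h; omega
    · rw [pvPos, if_neg hx] at hp
      have := ih (i + 1) p hp; omega

theorem pvPos_append (c : Char) : ∀ (a b : List Char) (i : Int),
    pvPos c (a ++ b) i = pvPos c a i ++ pvPos c b (i + a.length) := by
  intro a
  induction a with
  | nil => intro b i; simp [pvPos]
  | cons x t ih =>
    intro b i
    have hcast : i + 1 + (t.length : Int) = i + ((x :: t).length : Int) := by
      simp; omega
    by_cases hx : x = c
    · rw [List.cons_append, pvPos, if_pos hx, pvPos, if_pos hx, ih, hcast]
      simp
    · rw [List.cons_append, pvPos, if_neg hx, pvPos, if_neg hx, ih, hcast]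

theorem pvPos_all_eq (c : Char) : ∀ (m : List Char) (j : Int), (∀ y ∈ m, y = c) →
    pvPos c m j = pvSeq j m.length := by
  intro m
  induction m with
  | nil => intro j _; simp [pvPos, pvSeq]
  | cons x t ih =>
    intro j h
    have hx : x = c := h x (by simp)
    rw [pvPos, if_pos hx]
    simp only [List.length_cons, pvSeq]
    rw [ih (j + 1) (fun y hy => h y (by simp [hy]))]

theorem pvPos_nil_iff (c : Char) : ∀ (m : List Char) (j : Int), pvPos c m j = [] ↔ c ∉ m := by
  intro m
  induction m with
  | nil => intro j; simp [pvPos]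
  | cons x t ih =>
    intro j
    by_cases hx : x = c
    · rw [pvPos, if_pos hx]; simp [hx]
    · rw [pvPos, if_neg hx]; simp [ih (j + 1), Ne.symm hx]

theorem pvRuns_nil_iff (c : Char) : ∀ (m : List Char), pvRuns c m = [] ↔ c ∉ m := by
  intro m
  induction m using pvRuns.induct (c := c) with
  | case1 => simp [pvRuns]
  | case2 t _ => rw [pvRuns, if_pos rfl]; simp
  | case3 x t hx ih => rw [pvRuns, if_neg hx]; simp [ih, Ne.symm hx]

theorem pvRuns_append_of_ne (c : Char) : ∀ (m r : List Char), (∀ y ∈ m, y ≠ c) →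
    pvRuns c (m ++ r) = pvRuns c r := by
  intro m
  induction m with
  | nil => intro r _; simp
  | cons x t ih =>
    intro r h
    rw [List.cons_append, pvRuns, if_neg (h x (by simp))]
    exact ih r (fun y hy => h y (by simp [hy]))

-- takeWhile/dropWhile of a run of p followed by a non-p (or empty) suffix
theorem pvTakeDrop (p : Char) : ∀ (m : Nat) (r : List Char), (∀ y, r.head? = some y → y ≠ p) →
    (List.replicate m p ++ r).takeWhile (· == p) = List.replicate m p ∧
    (List.replicate m p ++ r).dropWhile (· == p) = r := by
  intro m
  induction m with
  | zero =>
    intro r h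
    cases r with
    | nil => simp
    | cons y t =>
      have hy : y ≠ p := h y rfl
      simp [hy]
  | succ n ih =>
    intro r h
    have := ih r h
    simp [List.replicate_succ, this.1, this.2]

theorem aChk_seq_append : ∀ (m : Nat) (j : Int) (ps : List Int), (∀ p ∈ ps, j + m + 1 < p) →
    (aChk (pvSeq j (m + 1) ++ ps) = true ↔ ps = []) := by
  intro m
  induction m with
  | zero =>
    intro j ps h
    cases ps with
    | nil => simp [pvSeq, aChk]
    | cons p r =>
      have := h p (by simp)
      simp only [pvSeq, List.nil_append, List.cons_append, aChk]
      rw [if_neg (by omega)]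
      simp
  | succ n ih =>
    intro j ps h
    have hs : pvSeq j (n + 1 + 1) ++ ps = j :: (pvSeq (j + 1) (n + 1) ++ ps) := by
      simp [pvSeq]
    have hs2 : pvSeq (j + 1) (n + 1) ++ ps = (j + 1) :: (pvSeq (j + 1 + 1) n ++ ps) := by
      simp [pvSeq]
    rw [hs, hs2, aChk, if_pos rfl, ← hs2, ih (j + 1) ps (fun p hp => by have := h p hp; omega)]

theorem aChk_iff_runs (c : Char) : ∀ (l : List Char), ∀ (i : Int),
    (aChk (pvPos c l i) = true ↔ (pvRuns c l).length ≤ 1) := by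
  intro l
  induction l using pvRuns.induct (c := c) with
  | case1 => intro i; simp [pvPos, pvRuns, aChk]
  | case2 t _ =>
    intro i
    have hsplit : t = t.takeWhile (· == c) ++ t.dropWhile (· == c) :=
      (List.takeWhile_append_dropWhile).symm
    set tw := t.takeWhile (· == c) with htw
    set dw := t.dropWhile (· == c) with hdw
    have htwc : ∀ y ∈ tw, y = c := by
      intro y hy
      have := List.mem_takeWhile_imp hy
      simpa using this
    have hdwh : ∀ y, dw.head? = some y → y ≠ c := by
      intro y hy
      have := List.head?_dropWhile_not (fun x => x == c) t
      rw [← hdw, hy] at this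
      simpa using this
    have hpos : pvPos c (c :: t) i = pvSeq i (tw.length + 1) ++ pvPos c dw (i + 1 + tw.length) := by
      rw [pvPos, if_pos rfl]
      conv_lhs => rw [hsplit]
      rw [pvPos_append, pvPos_all_eq c tw (i + 1) htwc]
      simp [pvSeq]
    have hps : ∀ p ∈ pvPos c dw (i + 1 + tw.length), i + (tw.length : Int) + 1 < p := by
      intro p hp
      cases hdwe : dw with
      | nil => rw [hdwe] at hp; simp [pvPos] at hp
      | cons y t' =>
        have hy : y ≠ c := hdwh y (by rw [hdwe]; rfl)
        rw [hdwe, pvPos, if_neg hy] at hp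
        have := pvPos_ge c t' (i + 1 + tw.length + 1) p hp
        omega
    rw [hpos, pvRuns, if_pos rfl, aChk_seq_append tw.length i _ hps, pvPos_nil_iff,
      ← pvRuns_nil_iff c dw, ← hdw]
    cases pvRuns c dw <;> simp
  | case3 x t hx ih =>
    intro i
    rw [pvPos, if_neg hx, pvRuns, if_neg hx]
    exact ih (i + 1)

theorem pvPos_length (c : Char) : ∀ (l : List Char), ∀ (i : Int),
    (pvPos c l i).length = (pvRuns c l).sum := by
  intro l
  induction l using pvRuns.induct (c := c) with
  | case1 => intro i; simp [pvPos, pvRuns]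
  | case2 t ih =>
    intro i
    have hsplit : t = t.takeWhile (· == c) ++ t.dropWhile (· == c) :=
      (List.takeWhile_append_dropWhile).symm
    set tw := t.takeWhile (· == c) with htw
    set dw := t.dropWhile (· == c) with hdw
    have htwc : ∀ y ∈ tw, y = c := by
      intro y hy
      have := List.mem_takeWhile_imp hy
      simpa using this
    have hseqlen : ∀ (k : Nat) (j : Int), (pvSeq j k).length = k := by
      intro k
      induction k with
      | zero => intro j; simp [pvSeq]
      | succ n ihk => intro j; simp [pvSeq, ihk]
    rw [pvPos, if_pos rfl, pvRuns, if_pos rfl]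
    conv_lhs => rw [hsplit]
    rw [pvPos_append, pvPos_all_eq c tw (i + 1) htwc, ← hdw, ← htw]
    simp [hseqlen, ih]
    omega
  | case3 x t hx ih =>
    intro i
    rw [pvPos, if_neg hx, pvRuns, if_neg hx]
    exact ih (i + 1)

theorem aPosLoop_get? (c : Char) : ∀ (l : List Char) (i : Int) (d : PySem.Dict Char (List Int)),
    (aPosLoop l i d).get? c =
      if pvPos c l i = [] then d.get? c else some ((d.get? c).getD [] ++ pvPos c l i) := by
  intro l
  induction l with
  | nil => intro i d; simp [aPosLoop, pvPos]
  | cons x t ih =>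
    intro i d
    rw [aPosLoop]
    by_cases hx : x = c
    · subst hx
      rw [pvPos, if_pos rfl]
      cases hdc : d.get? x with
      | none =>
        rw [ih, PySem.Dict.get?_insert_self, if_neg (List.cons_ne_nil i _)]
        split_ifs with h <;> simp [h]
      | some ps =>
        rw [ih, PySem.Dict.get?_insert_self, if_neg (List.cons_ne_nil i _)]
        split_ifs with h <;> simp [h]
    · rw [pvPos, if_neg hx]
      have hne : c ≠ x := Ne.symm hx
      cases hdc : d.get? x with
      | none => rw [ih, PySem.Dict.get?_insert_of_ne _ _ hne]
      | some ps => rw [ih, PySem.Dict.get?_insert_of_ne _ _ hne]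

theorem aPosLoop_nodup : ∀ (l : List Char) (i : Int) (d : PySem.Dict Char (List Int)),
    d.keys.Nodup → (aPosLoop l i d).keys.Nodup := by
  intro l
  induction l with
  | nil => intro i d h; simpa [aPosLoop] using h
  | cons x t ih =>
    intro i d h
    rw [aPosLoop]
    cases hdc : d.get? x with
    | none => exact ih _ _ (PySem.Dict.nodup_keys_insert _ _ _ h)
    | some ps => exact ih _ _ (PySem.Dict.nodup_keys_insert _ _ _ h)

-- B's dict maps c to (#runs, last run length)
theorem pvRuns_replicate_cons (p : Char) : ∀ (len : Nat) (r : List Char), 1 ≤ len →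
    (∀ y, r.head? = some y → y ≠ p) →
    pvRuns p (List.replicate len p ++ r) = len :: pvRuns p r := by
  intro len r hlen h
  obtain ⟨m, rfl⟩ : ∃ m, len = m + 1 := ⟨len - 1, by omega⟩
  have hrep : List.replicate (m + 1) p ++ r = p :: (List.replicate m p ++ r) := by
    simp [List.replicate_succ]
  have htd := pvTakeDrop p m r h
  rw [hrep, pvRuns, if_pos rfl, htd.1, htd.2]
  simp

theorem pvGetLastD_pos (rs : List Nat) (a b : Nat) (h : rs ≠ []) : rs.getLastD a = rs.getLastD b := by
  cases rs with
  | nil => simp at h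
  | cons x t =>
    cases t with
    | nil => simp
    | cons y u => simp only [List.getLastD_cons]

theorem bGo_get? (c : Char) : ∀ (l : List Char) (st : Option (Char × Int)) (d : PySem.Dict Char (Int × Int)),
    (∀ p len, st = some (p, len) → ∃ m : Nat, 1 ≤ m ∧ len = (m : Int)) →
    (bGo l st d).get? c =
      (let v := (match st with | none => [] | some (p, len) => List.replicate len.toNat p) ++ l
       if pvRuns c v = [] then d.get? c
       else some ((match d.get? c with | some q => q.1 | none => 0) + ((pvRuns c v).length : Int),
                  ((pvRuns c v).getLastD 0 : Int))) := by
  intro l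
  induction l with
  | nil =>
    intro st d hst
    cases st with
    | none => simp [bGo, bFlush, pvRuns]
    | some pr =>
      obtain ⟨p, len⟩ := pr
      obtain ⟨m, hm, rfl⟩ := hst p len rfl
      have htn : ((m : Int)).toNat = m := by omega
      simp only [bGo, bFlush, htn]
      by_cases hc : c = p
      · subst hc
        rw [pvRuns_replicate_cons c m [] hm (by simp), PySem.Dict.get?_insert_self]
        simp [pvRuns]
      · rw [pvRuns_append_of_ne c _ [] (fun y hy => by
              have := List.eq_of_mem_replicate hy; subst this; exact Ne.symm hc)]
        rw [PySem.Dict.get?_insert_of_ne _ _ hc]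
        simp [pvRuns]
  | cons x t ih =>
    intro st d hst
    cases st with
    | none =>
      rw [bGo]
      rw [ih (some (x, 1)) d (by rintro p len ⟨rfl, rfl⟩; exact ⟨1, by omega, by simp⟩)]
      simp
    | some pr =>
      obtain ⟨p, len⟩ := pr
      obtain ⟨m, hm, hlen⟩ := hst p len rfl
      subst hlen
      have htn : ((m : Int)).toNat = m := by omega
      by_cases hxp : x = p
      · subst hxp
        rw [bGo, if_pos rfl]
        rw [ih (some (x, (m : Int) + 1)) d (by rintro p' len' ⟨rfl, rfl⟩; exact ⟨m + 1, by omega, by push_cast; ring⟩)]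
        have hv : List.replicate (((m : Int) + 1)).toNat x ++ t = List.replicate ((m : Int)).toNat x ++ (x :: t) := by
          have : (((m : Int) + 1)).toNat = m + 1 := by omega
          rw [this, htn, List.replicate_succ']
          simp
        simp only [hv]
      · rw [bGo, if_neg hxp]
        rw [ih (some (x, 1)) _ (by rintro p' len' ⟨rfl, rfl⟩; exact ⟨1, by omega, by simp⟩)]
        simp only [bFlush, Int.toNat_one, List.replicate_one, List.singleton_append, htn]
        by_cases hc : c = p
        · subst hc
          rw [pvRuns_replicate_cons c m (x :: t) hm (fun y hy => by
                simp at hy; subst hy; exact hxp)]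
          rw [PySem.Dict.get?_insert_self]
          cases hre : pvRuns c (x :: t) with
          | nil =>
            simp
          | cons a b =>
            have h1 : ((a :: b : List Nat)).getLastD m = ((a :: b)).getLastD 0 :=
              pvGetLastD_pos (a :: b) m 0 (by simp)
            simp only [List.length_cons, List.getLastD_cons, h1]
            simp
            ring
        · rw [pvRuns_append_of_ne c _ (x :: t) (fun y hy => by
                have := List.eq_of_mem_replicate hy; subst this; exact Ne.symm hc)]
          rw [PySem.Dict.get?_insert_of_ne _ _ hc]

theorem aCollect_mem (x : Char) : ∀ (items : List (Char × List Int)) (st : PySem.Set Char),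
    x ∈ aCollect items st ↔ x ∈ st ∨ ∃ p ∈ items, p.1 = x ∧ (2 ≤ p.2.length ∧ aChk p.2 = true) := by
  intro items
  induction items with
  | nil => intro st; simp [aCollect]
  | cons q t ih =>
    obtain ⟨c, ps⟩ := q
    intro st
    rw [aCollect, ih]
    by_cases h : 2 ≤ ps.length ∧ aChk ps = true
    · rw [if_pos h]
      rw [PySem.Set.mem_add]
      simp only [List.mem_cons]
      constructor
      · rintro ((hst | rfl) | ⟨p, hp, hpx, hcond⟩)
        · exact Or.inl hst
        · exact Or.inr ⟨(x, ps), Or.inl (by simp), rfl, h⟩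
        · exact Or.inr ⟨p, Or.inr hp, hpx, hcond⟩
      · rintro (hst | ⟨p, hp | hp, hpx, hcond⟩)
        · exact Or.inl (Or.inl hst)
        · subst hp; exact Or.inl (Or.inr hpx.symm)
        · exact Or.inr ⟨p, hp, hpx, hcond⟩
    · rw [if_neg h]
      simp only [List.mem_cons]
      constructor
      · rintro (hst | ⟨p, hp, hpx, hcond⟩)
        · exact Or.inl hst
        · exact Or.inr ⟨p, Or.inr hp, hpx, hcond⟩
      · rintro (hst | ⟨p, hp | hp, hpx, hcond⟩)
        · exact Or.inl hst
        · exfalso; subst hp; exact h hcond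
        · exact Or.inr ⟨p, hp, hpx, hcond⟩

theorem scan_eq (st : PySem.Set Char) (d : PySem.Dict Char (Int × Int)) : ∀ (t : List Char),
    (∀ c ∈ t, (st.contains c = true ↔ ((d.getD c (0, 0)).1 = 1 ∧ 2 ≤ (d.getD c (0, 0)).2))) →
    aScan st t = bScan d t := by
  intro t
  induction t with
  | nil => intro _; rfl
  | cons c r ih =>
    intro h
    have hc := h c (by simp)
    rw [aScan, bScan]
    by_cases hm : st.contains c = true
    · rw [if_pos hm, if_pos (hc.mp hm)]
    · rw [if_neg hm, if_neg (fun hh => hm (hc.mpr hh))]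
      exact ih (fun c' h' => h c' (by simp [h']))

-- per-character equivalence of the two stability tests
theorem stable_iff (c : Char) (l : List Char) (hc : c ∈ l) :
    (2 ≤ (pvPos c l 0).length ∧ aChk (pvPos c l 0) = true) ↔
      (((pvRuns c l).length : Int) = 1 ∧ 2 ≤ ((pvRuns c l).getLastD 0 : Int)) := by
  have hruns_ne : pvRuns c l ≠ [] := by rw [ne_eq, pvRuns_nil_iff]; simpa
  rw [aChk_iff_runs, pvPos_length]
  constructor
  · rintro ⟨hsum, hle⟩
    have h1 : (pvRuns c l).length = 1 := by
      cases hre : pvRuns c l with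
      | nil => exact absurd hre hruns_ne
      | cons a b => rw [hre] at hle; simp at hle; simp [hle]
    obtain ⟨r, hr⟩ := List.length_eq_one_iff.mp h1
    rw [hr] at hsum ⊢
    simp at hsum ⊢
    omega
  · rintro ⟨h1, hlast⟩
    have h1' : (pvRuns c l).length = 1 := by exact_mod_cast h1
    obtain ⟨r, hr⟩ := List.length_eq_one_iff.mp h1'
    rw [hr] at hlast ⊢
    simp at hlast ⊢
    omega

-- ===== VERDICT (by name: the statement is the Claim_ definition above) =====
theorem first_stable_character_spec : Claim_equal_first_stable_character := by
  intro s _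
  unfold Spec_first_stable_character first_stable_character first_stable_character_alt
  simp only []
  apply scan_eq
  intro c hc
  have hpos_ne : pvPos c s.toList 0 ≠ [] := by rw [ne_eq, pvPos_nil_iff]; simpa
  have hruns_ne : pvRuns c s.toList ≠ [] := by rw [ne_eq, pvRuns_nil_iff]; simpa
  have hA : (aPosLoop s.toList 0 PySem.Dict.empty).get? c = some (pvPos c s.toList 0) := by
    rw [aPosLoop_get?, if_neg hpos_ne]
    simp [PySem.Dict.get?_empty]
  have hnd : (aPosLoop s.toList 0 PySem.Dict.empty).keys.Nodup :=
    aPosLoop_nodup s.toList 0 _ PySem.Dict.nodup_keys_empty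
  have hB : (bGo s.toList none PySem.Dict.empty).get? c =
      some ((((pvRuns c s.toList).length : Nat) : Int), (((pvRuns c s.toList).getLastD 0 : Nat) : Int)) := by
    rw [bGo_get? c s.toList none _ (by rintro p len ⟨⟩)]
    simp only [List.nil_append]
    rw [if_neg hruns_ne]
    simp [PySem.Dict.get?_empty]
  have hBD : (bGo s.toList none PySem.Dict.empty).getD c (0, 0) =
      ((((pvRuns c s.toList).length : Nat) : Int), (((pvRuns c s.toList).getLastD 0 : Nat) : Int)) :=
    PySem.Dict.getD_of_get?_eq_some _ _ hB
  rw [PySem.Set.contains_iff, aCollect_mem, hBD]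
  constructor
  · rintro (hmem | ⟨⟨pc, pps⟩, hp, hpx, hlen, hchk⟩)
    · simp [PySem.Set.empty] at hmem
    · simp only at hpx
      subst hpx
      have hget := PySem.Dict.get?_of_mem_items _ hp hnd
      rw [hA] at hget
      have hps : pps = pvPos pc s.toList 0 := by injection hget.symm
      subst hps
      exact (stable_iff pc s.toList hc).mp ⟨hlen, hchk⟩
  · intro hB2
    refine Or.inr ⟨(c, pvPos c s.toList 0), ?_, rfl, (stable_iff c s.toList hc).mpr hB2⟩
    exact PySem.Dict.mem_items_of_get?_eq_some _ hA
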